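-- pv_equiv track=rewrite | github.com/mike-koala-bear/capybara-test | backend/main.py | _normalize_game_word
-- ===== SOURCE A (Python) =====
-- import unicodedata
-- from typing import Optional, List, Tuple, Dict
--
-- def _normalize_game_word(s: str) -> str:
--     """General normalization used for non-country words: letters and single hyphens.
--     Keeps hyphens for multi-word phrases (legacy behavior).
--     """
--     # Lowercase and strip accents
--     s = unicodedata.normalize("NFKD", (s or "").lower())
--     s = s.encode("ascii", "ignore").decode("ascii")
--     s = s.replace("&", " and ")
--     # Map various separators/punctuation to hyphens and drop others
--     out_chars: List[str] = []
--     prev_hyphen = False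
--     for ch in s:
--         if "a" <= ch <= "z":
--             out_chars.append(ch)
--             prev_hyphen = False
--         elif ch in [" ", "-", "'", "’", ".", ",", "(", ")", "/"]:
--             # collapse consecutive hyphens later
--             if not prev_hyphen:
--                 out_chars.append("-")
--                 prev_hyphen = True
--         else:
--             # skip other characters
--             continue
--     # Remove leading/trailing hyphens and collapse multiples
--     cleaned: List[str] = []
--     prev_h = False
--     for ch in out_chars:
--         if ch == "-":
--             if not prev_h:
--                 cleaned.append("-")
--             prev_h = True
--         else:
--             cleaned.append(ch)
--             prev_h = False
--     result = "".join(cleaned).strip("-")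
--     return result
-- ===== SOURCE B (Python) =====
-- import unicodedata
-- import re
--
-- def _normalize_game_word(s: str) -> str:
--     """Same normalization via two regex substitutions instead of two explicit
--     character loops with a prev_hyphen state machine."""
--     s = unicodedata.normalize("NFKD", (s or "").lower())
--     s = s.encode("ascii", "ignore").decode("ascii").replace("&", " and ")
--     # drop everything that is neither a lowercase letter nor a separator
--     s = re.sub(r"[^a-z '’.,()/-]", "", s)
--     # collapse each run of separators to a single hyphen
--     s = re.sub(r"[ '’.,()/-]+", "-", s)
--     return s.strip("-")
-- ===== Notes on version B (the rewrite author's own statement) =====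
-- stated objective: idiomatic
-- what changed: Replaces the two explicit character loops with prev_hyphen/prev_h state machines by a drop-then-collapse pipeline: one regex substitution removing non-kept characters followed by one rewriting each run of separators to a single hyphen (C-level regex engine instead of per-character Python loops).
import Mathlib
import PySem

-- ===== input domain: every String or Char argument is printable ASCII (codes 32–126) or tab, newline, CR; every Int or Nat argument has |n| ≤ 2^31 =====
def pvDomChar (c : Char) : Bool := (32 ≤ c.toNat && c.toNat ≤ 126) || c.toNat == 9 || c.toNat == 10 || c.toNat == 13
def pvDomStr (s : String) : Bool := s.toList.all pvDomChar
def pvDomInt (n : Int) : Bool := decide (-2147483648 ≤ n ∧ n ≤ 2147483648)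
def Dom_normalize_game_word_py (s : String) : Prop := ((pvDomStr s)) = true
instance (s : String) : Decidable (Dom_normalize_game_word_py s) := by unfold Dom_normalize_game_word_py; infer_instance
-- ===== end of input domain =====

-- B replaces A's two explicit state-machine loops by a filter followed by a single
-- run-collapsing pass (regex substitutions in the Python); same output, idiomatic.

-- ===== PORT A =====
-- the separator list of A's `ch in [...]` test
def nga_sep (c : Char) : Bool :=
  c == ' ' || c == '-' || c == '\'' || c == '’' || c == '.' || c == ',' ||
  c == '(' || c == ')' || c == '/'

-- A's first loop over s with the prev_hyphen flag
def nga_loopA : List Char → Bool → List Char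
  | [], _ => []
  | c :: cs, prev =>
    if 'a' ≤ c && c ≤ 'z' then c :: nga_loopA cs false
    else if nga_sep c then
      (if prev then nga_loopA cs true else '-' :: nga_loopA cs true)
    else nga_loopA cs prev

-- A's second loop (collapse consecutive hyphens) with the prev_h flag
def nga_pass2 : List Char → Bool → List Char
  | [], _ => []
  | c :: cs, prev =>
    if c == '-' then (if prev then nga_pass2 cs true else '-' :: nga_pass2 cs true)
    else c :: nga_pass2 cs false

def normalize_game_word_py (s : String) : String :=
  -- NFKD normalization and ascii-ignore re-encoding are the identity on the
  -- printable-ASCII domain, so they are ported as such (exact on Dom).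
  let s1 := PySem.Str.lower s
  let s2 := PySem.Str.replace s1 "&" " and "
  let out_chars := nga_loopA s2.toList false
  let cleaned := nga_pass2 out_chars false
  String.mk (PySem.Chars.stripChars cleaned ['-'])

-- ===== PORT B =====
-- the character class kept by B's first regex
def nga_keep (c : Char) : Bool := ('a' ≤ c && c ≤ 'z') || nga_sep c

-- B's second regex: each run of separators becomes one hyphen
def nga_collapse : List Char → List Char
  | [] => []
  | c :: cs =>
    if nga_sep c then '-' :: nga_collapse (cs.dropWhile nga_sep)
    else c :: nga_collapse cs
termination_by l => l.length
decreasing_by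
  · exact Nat.lt_succ_of_le (cs.length_dropWhile_le nga_sep)
  · simp

def normalize_game_word_py_alt (s : String) : String :=
  -- same prefix as A (NFKD/ascii-ignore identity on the ASCII domain)
  let s1 := PySem.Str.lower s
  let s2 := PySem.Str.replace s1 "&" " and "
  -- re.sub(r"[^a-z '’.,()/-]", "", s): drop every non-kept character
  let t := s2.toList.filter nga_keep
  -- re.sub(r"[ '’.,()/-]+", "-", s): collapse separator runs to single hyphens
  let u := nga_collapse t
  String.mk (PySem.Chars.stripChars u ['-'])

-- ===== PRECONDITION & SPEC =====
def Spec_normalize_game_word_py (s : String) (out : String) : Prop := out = normalize_game_word_py_alt s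
instance (s : String) (out : String) : Decidable (Spec_normalize_game_word_py s out) := by unfold Spec_normalize_game_word_py; infer_instance

-- ===== CLAIM (what is proved, stated in full; the proofs are below) =====
def Claim_equal_normalize_game_word_py : Prop := ∀ (s : String), Dom_normalize_game_word_py s → Spec_normalize_game_word_py s (normalize_game_word_py s)

-- ===== LEMMAS AND PROOFS =====

theorem nga_lower_not_sep {c : Char} (h : ('a' ≤ c && c ≤ 'z') = true) :
    nga_sep c = false := by
  unfold nga_sep
  simp only [Bool.and_eq_true, decide_eq_true_eq] at h
  simp only [Bool.or_eq_false_iff, beq_eq_false_iff_ne, ne_eq]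
  refine ⟨⟨⟨⟨⟨⟨⟨⟨?_, ?_⟩, ?_⟩, ?_⟩, ?_⟩, ?_⟩, ?_⟩, ?_⟩, ?_⟩ <;>
    (rintro rfl; revert h; decide)

theorem nga_loopA_eq_collapse (l : List Char) :
    nga_loopA l false = nga_collapse (l.filter nga_keep) ∧
    nga_loopA l true = nga_collapse ((l.filter nga_keep).dropWhile nga_sep) := by
  induction l with
  | nil => exact ⟨by simp [nga_loopA, nga_collapse], by simp [nga_loopA, nga_collapse]⟩
  | cons c cs ih =>
    by_cases hl : ('a' ≤ c && c ≤ 'z') = true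
    · have hs : nga_sep c = false := nga_lower_not_sep hl
      have hk : nga_keep c = true := by simp [nga_keep, hl]
      constructor <;>
        simp [nga_loopA, nga_collapse, List.filter, List.dropWhile, hl, hs, hk, ih.1]
    · by_cases hs : nga_sep c = true
      · have hk : nga_keep c = true := by simp [nga_keep, hs]
        constructor <;>
          simp [nga_loopA, nga_collapse, List.filter, List.dropWhile, hl, hs, hk, ih.2]
      · have hk : nga_keep c = false := by
          simp only [nga_keep, Bool.or_eq_false_iff]
          exact ⟨by simpa using hl, by simpa using hs⟩
        constructor <;> simp [nga_loopA, List.filter, hl, hs, hk, ih.1, ih.2]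

theorem nga_head_dropWhile (cs : List Char) {c : Char}
    (h : (cs.dropWhile nga_sep).head? = some c) : nga_sep c = false := by
  induction cs with
  | nil => simp [List.dropWhile] at h
  | cons a as ih =>
    by_cases ha : nga_sep a = true
    · exact ih (by simpa [List.dropWhile, ha] using h)
    · simp [List.dropWhile, ha] at h
      subst h; simpa using ha

theorem nga_pass2_collapse :
    ∀ (n : ℕ) (m : List Char), m.length ≤ n →
      (nga_pass2 (nga_collapse m) false = nga_collapse m ∧
       ((∀ c, m.head? = some c → nga_sep c = false) →
         nga_pass2 (nga_collapse m) true = nga_collapse m)) := by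
  intro n
  induction n with
  | zero =>
    intro m hm
    have : m = [] := List.eq_nil_of_length_eq_zero (Nat.le_zero.1 hm)
    subst this; exact ⟨by simp [nga_collapse, nga_pass2], fun _ => by simp [nga_collapse, nga_pass2]⟩
  | succ n ih =>
    intro m hm
    match m with
    | [] => exact ⟨by simp [nga_collapse, nga_pass2], fun _ => by simp [nga_collapse, nga_pass2]⟩
    | c :: cs =>
      by_cases hs : nga_sep c = true
      · -- collapse = '-' :: collapse (dropWhile sep cs)
        have hd : (cs.dropWhile nga_sep).length ≤ n :=
          le_trans (cs.length_dropWhile_le nga_sep) (Nat.le_of_succ_le_succ hm)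
        have h2 := (ih _ hd).2 (fun c h => nga_head_dropWhile cs h)
        constructor
        · simp [nga_collapse, nga_pass2, hs, h2]
        · intro hh
          exact absurd (hh c rfl) (by simp [hs])
      · -- collapse = c :: collapse cs, and c ≠ '-'
        have hne : (c == '-') = false := by
          rcases Bool.eq_false_iff.1 (by simpa using hs) with h
          simp only [beq_eq_false_iff_ne, ne_eq]
          rintro rfl; exact h (by simp [nga_sep])
        have h1 := (ih cs (Nat.le_of_succ_le_succ hm)).1
        constructor
        · simp [nga_collapse, nga_pass2, hs, hne, h1]
        · intro _; simp [nga_collapse, nga_pass2, hs, hne, h1]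

theorem nga_main (l : List Char) :
    nga_pass2 (nga_loopA l false) false = nga_collapse (l.filter nga_keep) := by
  rw [(nga_loopA_eq_collapse l).1]
  exact (nga_pass2_collapse _ _ (le_refl _)).1

-- ===== VERDICT (by name: the statement is the Claim_ definition above) =====
theorem normalize_game_word_py_spec : Claim_equal_normalize_game_word_py := by
  intro s _
  show normalize_game_word_py s = normalize_game_word_py_alt s
  unfold normalize_game_word_py normalize_game_word_py_alt
  simp only [nga_main]
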